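-- pv_equiv track=rewrite | github.com/OpenBlatam/IA-Models-Clone | bulk_truthgpt/production_ultra_optimal_system.py | _determine_optimization_level
-- ===== SOURCE A (Python) =====
-- from typing import Dict, Any, List, Optional, AsyncGenerator, Tuple, Union
--
-- def _determine_optimization_level(optimization_metrics: Dict[str, Any]) -> str:
--     """Determine the optimization level based on applied optimizations."""
--     if not optimization_metrics:
--         return 'none'
--
--     optimization_count = sum(1 for v in optimization_metrics.values() if v)
--
--     if optimization_count >= 8:
--         return 'production_ultra_optimal'
--     elif optimization_count >= 6:
--         return 'transcendent'
--     elif optimization_count >= 4: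
--         return 'supreme'
--     elif optimization_count >= 3:
--         return 'mega_enhanced'
--     elif optimization_count >= 2:
--         return 'ultra'
--     elif optimization_count >= 1:
--         return 'enhanced'
--     else:
--         return 'basic'
-- ===== SOURCE B (Python) =====
-- def _determine_optimization_level(optimization_metrics):
--     """Determine the optimization level based on applied optimizations."""
--     if not optimization_metrics:
--         return 'none'
--
--     optimization_count = sum(1 for v in optimization_metrics.values() if v)
--
--     thresholds = [1, 2, 3, 4, 6, 8]
--     labels = ['basic', 'enhanced', 'ultra', 'mega_enhanced',
--               'supreme', 'transcendent', 'production_ultra_optimal']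
--     # hand-written bisect_right (binary search for first threshold > count)
--     lo, hi = 0, len(thresholds)
--     while lo < hi:
--         mid = (lo + hi) // 2
--         if optimization_count < thresholds[mid]:
--             hi = mid
--         else:
--             lo = mid + 1
--     return labels[lo]
-- ===== Notes on version B (the rewrite author's own statement) =====
-- stated objective: alternative
-- what changed: Replaces the descending if/elif cascade with an ascending threshold table plus label table indexed by a hand-written bisect_right binary search over the thresholds.
import Mathlib
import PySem

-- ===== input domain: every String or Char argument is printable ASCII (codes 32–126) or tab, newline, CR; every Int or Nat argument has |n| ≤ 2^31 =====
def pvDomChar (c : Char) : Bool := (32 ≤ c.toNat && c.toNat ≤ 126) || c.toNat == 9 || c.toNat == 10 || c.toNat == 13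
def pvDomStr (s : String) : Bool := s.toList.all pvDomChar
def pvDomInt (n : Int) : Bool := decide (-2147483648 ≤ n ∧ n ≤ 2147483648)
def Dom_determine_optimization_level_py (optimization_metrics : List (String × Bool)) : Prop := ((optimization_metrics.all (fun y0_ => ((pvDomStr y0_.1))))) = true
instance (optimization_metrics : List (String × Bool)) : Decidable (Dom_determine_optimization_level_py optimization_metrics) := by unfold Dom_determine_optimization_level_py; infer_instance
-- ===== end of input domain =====

-- B replaces the descending if/elif cascade with an ascending threshold table + label table
-- indexed via a hand-written bisect_right binary search (alternative structure, same cost).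


-- ===== PORT A =====
def determine_optimization_level_py (optimization_metrics : List (String × Bool)) : String :=
  if optimization_metrics = [] then "none"
  else
    let optimization_count : Int :=
      optimization_metrics.foldl (fun acc p => if p.2 then acc + 1 else acc) 0
    if optimization_count ≥ 8 then "production_ultra_optimal"
    else if optimization_count ≥ 6 then "transcendent"
    else if optimization_count ≥ 4 then "supreme"
    else if optimization_count ≥ 3 then "mega_enhanced"
    else if optimization_count ≥ 2 then "ultra"
    else if optimization_count ≥ 1 then "enhanced"
    else "basic"

-- ===== PORT B =====
-- hand-written bisect_right from Source B; fuel = hi - lo makes the while-loop total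
def pvBisectRight (arr : List Int) (x : Int) (lo hi fuel : Nat) : Nat :=
  match fuel with
  | 0 => lo
  | fuel + 1 =>
    if lo < hi then
      let mid := (lo + hi) / 2
      if x < arr.getD mid 0 then pvBisectRight arr x lo mid fuel
      else pvBisectRight arr x (mid + 1) hi fuel
    else lo

def pvThresholds : List Int := [1, 2, 3, 4, 6, 8]
def pvLabels : List String :=
  ["basic", "enhanced", "ultra", "mega_enhanced",
   "supreme", "transcendent", "production_ultra_optimal"]

def determine_optimization_level_py_alt (optimization_metrics : List (String × Bool)) : String :=
  if optimization_metrics = [] then "none"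
  else
    let optimization_count : Int :=
      optimization_metrics.foldl (fun acc p => if p.2 then acc + 1 else acc) 0
    pvLabels.getD (pvBisectRight pvThresholds optimization_count 0 6 6) ""

-- ===== PRECONDITION & SPEC =====
def Spec_determine_optimization_level_py (optimization_metrics : List (String × Bool)) (out : String) : Prop := out = determine_optimization_level_py_alt optimization_metrics
instance (optimization_metrics : List (String × Bool)) (out : String) : Decidable (Spec_determine_optimization_level_py optimization_metrics out) := by unfold Spec_determine_optimization_level_py; infer_instance

-- ===== CLAIM (what is proved, stated in full; the proofs are below) =====
def Claim_equal_determine_optimization_level_py : Prop := ∀ (optimization_metrics : List (String × Bool)), Dom_determine_optimization_level_py optimization_metrics → Spec_determine_optimization_level_py optimization_metrics (determine_optimization_level_py optimization_metrics)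

-- ===== LEMMAS AND PROOFS =====
lemma pvCount_nonneg (l : List (String × Bool)) (a : Int) (h : 0 ≤ a) :
    0 ≤ l.foldl (fun acc p => if p.2 then acc + 1 else acc) a := by
  induction l generalizing a with
  | nil => simpa
  | cons x xs ih =>
    simp only [List.foldl]
    by_cases hx : x.2 = true
    · simp only [hx, if_true]; exact ih _ (by linarith)
    · simp only [hx]; exact ih _ h

lemma pvBisect_ge8 (c : Int) (h : 8 ≤ c) : pvBisectRight pvThresholds c 0 6 6 = 6 := by
  simp only [pvBisectRight, pvThresholds]
  norm_num
  split_ifs <;> omega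

lemma pvCascade_eq (c : Int) (h0 : 0 ≤ c) :
    (if c ≥ 8 then "production_ultra_optimal"
     else if c ≥ 6 then "transcendent"
     else if c ≥ 4 then "supreme"
     else if c ≥ 3 then "mega_enhanced"
     else if c ≥ 2 then "ultra"
     else if c ≥ 1 then "enhanced"
     else "basic")
    = pvLabels.getD (pvBisectRight pvThresholds c 0 6 6) "" := by
  by_cases h8 : 8 ≤ c
  · rw [pvBisect_ge8 c h8, if_pos h8]; rfl
  · have : c ≤ 8 := by omega
    interval_cases c <;> rfl

-- ===== VERDICT (by name: the statement is the Claim_ definition above) =====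
theorem determine_optimization_level_py_spec : Claim_equal_determine_optimization_level_py := by
  intro m _
  unfold Spec_determine_optimization_level_py determine_optimization_level_py
    determine_optimization_level_py_alt
  by_cases hm : m = []
  · simp [hm]
  · simp only [hm, if_false]
    exact pvCascade_eq _ (pvCount_nonneg m 0 le_rfl)
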